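-- pv_equiv track=rewrite | github.com/pieterjanuithetbos/LR | main.py | index_machine
-- ===== SOURCE A (Python) =====
-- def index_machine(lijst):
--     '''
--     Geeft een lijst terug met op elke positie de index van het laatst voorgekomen unieke element in de opgegeven lijst.
--     :param lijst: een lijst getallen waar dubbels in staan
--     :return indices, x-as: de indices van alle eerste voorkomens van unieke elementen, het gemiddelde van die indices
--     '''
--     indices = [0]  # initialiseer de indices-lijst
--     n = len(lijst)
--     i = 0
--     while i < n:
--         k = i + 1
--         while k < n and lijst[k] == lijst[i]:
--             indices.append(i)
--             k += 1
--             # element op positie k is nu het eerste 'nieuwe' element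
--         x_mean = (k + i) / 2
--         # voeg de indices toe van de unieke elementen
--         indices.append(k)
--         # zoek verder vanaf het eerste 'nieuwe' element
--         i = k
--     return indices[:-1]
-- ===== SOURCE B (Python) =====
-- def index_machine(lijst):
--     res = []
--     start = 0
--     for j in range(len(lijst)):
--         if j == 0 or lijst[j] != lijst[start]:
--             start = j
--         res.append(start)
--     return res
-- ===== Notes on version B (the rewrite author's own statement) =====
-- stated objective: simpler
-- what changed: Replaced A's nested run-skipping while loops (with the [0] seed, the boundary append of the next run's start, and the final [:-1] trim) by one flat forward loop that carries the current run's start index and appends it for every position.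
import Mathlib
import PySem

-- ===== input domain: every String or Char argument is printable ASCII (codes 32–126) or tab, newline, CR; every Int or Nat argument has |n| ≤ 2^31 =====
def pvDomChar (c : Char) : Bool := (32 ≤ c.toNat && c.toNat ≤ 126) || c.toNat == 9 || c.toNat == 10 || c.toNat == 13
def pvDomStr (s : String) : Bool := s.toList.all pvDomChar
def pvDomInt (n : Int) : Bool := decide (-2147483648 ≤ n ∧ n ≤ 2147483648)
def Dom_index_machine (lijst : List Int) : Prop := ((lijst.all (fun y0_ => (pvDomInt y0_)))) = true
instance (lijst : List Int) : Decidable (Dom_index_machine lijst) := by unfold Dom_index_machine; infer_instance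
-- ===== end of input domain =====

-- B replaces A's nested run-skipping while loops (with their [0] seed and trailing [:-1] trim)
-- by one flat forward pass carrying the current run's start index; objective: simpler.

-- ===== PORT A =====
-- inner while loop: 'while k < n and lijst[k] == lijst[i]: indices.append(i); k += 1'
-- (every index reached is < n = lijst.length, so List.getD is exact for Python's lijst[k])
def pyA_inner (lijst : List Int) (n i k : Nat) (acc : List Int) : Nat × List Int :=
  if k < n ∧ lijst.getD k 0 = lijst.getD i 0 then
    pyA_inner lijst n i (k + 1) (acc ++ [Int.ofNat i])
  else (k, acc)
termination_by n - k
decreasing_by omega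

-- termination helper for the outer loop: the inner loop never decreases k
theorem pyA_inner_ge (lijst : List Int) (n i k : Nat) (acc : List Int) :
    k ≤ (pyA_inner lijst n i k acc).1 := by
  fun_induction pyA_inner with
  | case1 a b c d => omega
  | case2 => simp

-- outer while loop: 'while i < n: (inner loop); indices.append(k); i = k'
def pyA_outer (lijst : List Int) (n i : Nat) (acc : List Int) : List Int :=
  if _h : i < n then
    let r := pyA_inner lijst n i (i + 1) acc
    pyA_outer lijst n r.1 (r.2 ++ [Int.ofNat r.1])
  else acc
termination_by n - i
decreasing_by have := pyA_inner_ge lijst n i (i + 1) acc; omega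

-- 'indices[:-1]' is exactly List.dropLast
def index_machine (lijst : List Int) : List Int :=
  (pyA_outer lijst lijst.length 0 [0]).dropLast

-- ===== PORT B =====
-- loop body: 'if j == 0 or lijst[j] != lijst[start]: start = j; res.append(start)'
def bStep (lijst : List Int) (p : Nat × List Int) (j : Nat) : Nat × List Int :=
  let start := if j = 0 ∨ lijst.getD j 0 ≠ lijst.getD p.1 0 then j else p.1
  (start, p.2 ++ [Int.ofNat start])

-- 'for j in range(len(lijst)): …; return res'
def index_machine_alt (lijst : List Int) : List Int :=
  ((List.range lijst.length).foldl (bStep lijst) (0, ([] : List Int))).2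

-- ===== PRECONDITION & SPEC =====
def Spec_index_machine (lijst : List Int) (out : List Int) : Prop := out = index_machine_alt lijst
instance (lijst : List Int) (out : List Int) : Decidable (Spec_index_machine lijst out) := by unfold Spec_index_machine; infer_instance

-- ===== CLAIM (what is proved, stated in full; the proofs are below) =====
def Claim_equal_index_machine : Prop := ∀ (lijst : List Int), Dom_index_machine lijst → Spec_index_machine lijst (index_machine lijst)

-- ===== LEMMAS AND PROOFS =====

-- the run-start sequence for positions j, j+1, …, n-1, given st = start of the run containing j-1
def bGo (lijst : List Int) (n j st : Nat) : List Int :=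
  if j < n then
    Int.ofNat (if j = 0 ∨ lijst.getD j 0 ≠ lijst.getD st 0 then j else st)
      :: bGo lijst n (j + 1) (if j = 0 ∨ lijst.getD j 0 ≠ lijst.getD st 0 then j else st)
  else []
termination_by n - j
decreasing_by omega

theorem bGo_spec (lijst : List Int) (n : Nat) :
    ∀ m j st acc, n - j = m → ((List.range' j (n - j)).foldl (bStep lijst) (st, acc)).2
      = acc ++ bGo lijst n j st := by
  intro m
  induction m with
  | zero =>
    intro j st acc hm
    rw [hm, bGo, if_neg (show ¬ j < n by omega)]
    simp
  | succ m ih =>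
    intro j st acc hm
    have hj : j < n := by omega
    rw [hm, List.range'_succ, List.foldl_cons]
    conv_lhs => rw [show m = n - (j + 1) by omega]
    conv_rhs => rw [bGo, if_pos hj]
    by_cases hc : j = 0 ∨ lijst.getD j 0 ≠ lijst.getD st 0
    · rw [if_pos hc]
      rw [show bStep lijst (st, acc) j = (j, acc ++ [Int.ofNat j]) by
        simp only [bStep, if_pos hc]]
      rw [ih (j + 1) j (acc ++ [Int.ofNat j]) (by omega)]
      simp
    · rw [if_neg hc]
      rw [show bStep lijst (st, acc) j = (st, acc ++ [Int.ofNat st]) by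
        simp only [bStep, if_neg hc]]
      rw [ih (j + 1) st (acc ++ [Int.ofNat st]) (by omega)]
      simp

-- one outer step, viewed from inside the inner loop, emits bGo's run starts plus the
-- trailing n that the final [:-1] removes
theorem A_outer_spec (lijst : List Int) (n : Nat) :
    ∀ m k i acc, n - k = m → i < k → k ≤ n →
      pyA_outer lijst n (pyA_inner lijst n i k acc).1
        ((pyA_inner lijst n i k acc).2 ++ [Int.ofNat (pyA_inner lijst n i k acc).1])
      = acc ++ bGo lijst n k i ++ [Int.ofNat n] := by
  intro m
  induction m with
  | zero =>
    intro k i acc hm hik hkn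
    have hkeq : k = n := by omega
    have hc : ¬ (k < n ∧ lijst.getD k 0 = lijst.getD i 0) := by
      intro h; omega
    rw [pyA_inner, if_neg hc]
    show pyA_outer lijst n k (acc ++ [Int.ofNat k]) = _
    rw [pyA_outer, dif_neg (show ¬ k < n by omega)]
    rw [bGo, if_neg (show ¬ k < n by omega)]
    simp [hkeq]
  | succ m ih =>
    intro k i acc hm hik hkn
    have hkn' : k < n := by omega
    by_cases heq : lijst.getD k 0 = lijst.getD i 0
    · -- lijst[k] == lijst[i]: inner loop appends i and advances
      rw [pyA_inner, if_pos ⟨hkn', heq⟩]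
      rw [ih (k + 1) i (acc ++ [Int.ofNat i]) (by omega) (by omega) (by omega)]
      have hk0 : ¬ (k = 0 ∨ lijst.getD k 0 ≠ lijst.getD i 0) := by
        push Not; exact ⟨by omega, heq⟩
      conv_rhs => rw [bGo, if_pos hkn', if_neg hk0]
      simp
    · -- lijst[k] != lijst[i]: inner loop stops, outer starts a new run at k
      have hc : ¬ (k < n ∧ lijst.getD k 0 = lijst.getD i 0) := by
        intro h; exact heq h.2
      rw [pyA_inner, if_neg hc]
      show pyA_outer lijst n k (acc ++ [Int.ofNat k]) = _
      rw [pyA_outer, dif_pos hkn']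
      show pyA_outer lijst n (pyA_inner lijst n k (k + 1) (acc ++ [Int.ofNat k])).1
            ((pyA_inner lijst n k (k + 1) (acc ++ [Int.ofNat k])).2 ++
              [Int.ofNat (pyA_inner lijst n k (k + 1) (acc ++ [Int.ofNat k])).1]) = _
      rw [ih (k + 1) k (acc ++ [Int.ofNat k]) (by omega) (by omega) (by omega)]
      conv_rhs => rw [bGo, if_pos hkn', if_pos (Or.inr heq)]
      simp

-- ===== VERDICT (by name: the statement is the Claim_ definition above) =====
theorem index_machine_spec : Claim_equal_index_machine := by
  intro lijst _
  unfold Spec_index_machine index_machine index_machine_alt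
  rw [List.range_eq_range']
  have hb := bGo_spec lijst lijst.length (lijst.length - 0) 0 0 [] rfl
  simp only [Nat.sub_zero, List.nil_append] at hb
  rw [hb]
  by_cases h0 : 0 < lijst.length
  · rw [pyA_outer, dif_pos h0]
    show (pyA_outer lijst lijst.length (pyA_inner lijst lijst.length 0 (0 + 1) [0]).1
        ((pyA_inner lijst lijst.length 0 (0 + 1) [0]).2 ++
          [Int.ofNat (pyA_inner lijst lijst.length 0 (0 + 1) [0]).1])).dropLast = _
    rw [A_outer_spec lijst lijst.length (lijst.length - 1) (0 + 1) 0 [0] rfl (by omega)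
      (by omega)]
    conv_rhs => rw [bGo, if_pos h0, if_pos (Or.inl rfl)]
    rw [List.dropLast_concat]
    simp
  · rw [pyA_outer, dif_neg (by omega : ¬ 0 < lijst.length)]
    rw [bGo, if_neg (by omega : ¬ 0 < lijst.length)]
    simp
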